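-- pv_equiv track=rewrite | github.com/AnnLad15/FormalLanguageTheory | Lab2/table_nfa.py | reachable_table_filtered_nfa
-- ===== SOURCE A (Python) =====
-- def reachable_table_filtered_nfa(states, alphabet, transitions, final_states, max_depth=3):
--     from itertools import product
--
--     words = [""]
--     for d in range(1, max_depth + 1):
--         for w in product(alphabet, repeat=d):
--             words.append("".join(w))
--
--     def delta_star(states_set, word):
--         current = set(states_set)
--         for symbol in word:
--             next_states = set()
--             for state in current:
--                 if state in transitions and symbol in transitions[state]:
--                     next_states.update(transitions[state][symbol])
--             current = next_states
--             if not current: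
--                 break
--         return current
--
--     table = {}
--     for w in words:
--         row = {}
--         for s in states:
--             end_states = delta_star({s}, w)
--             row[s] = "+" if end_states & final_states else ""
--         table[w] = row
--
--     filtered_table = {
--         w: row for w, row in table.items()
--         if any(v == "+" for v in row.values())
--     }
--
--     return filtered_table
-- ===== SOURCE B (Python) =====
-- def reachable_table_filtered_nfa(states, alphabet, transitions, final_states, max_depth=3):
--     words = [""]
--     level = [""]
--     for _ in range(max_depth):
--         level = [w + sym for w in level for sym in alphabet]
--         words.extend(level)
--
--     table = {}
--     for w in words:
--         # Backward reachability: acc is the set of states from which some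
--         # accepting state is reachable on the remaining suffix of w.
--         acc = set(final_states)
--         for ch in reversed(w):
--             acc = {s for s, row in transitions.items()
--                    if any(q in acc for q in row.get(ch, ()))}
--             if not acc:
--                 break
--         row = {s: ("+" if s in acc else "") for s in states}
--         if "+" in row.values():
--             table[w] = row
--     return table
-- ===== Notes on version B (the rewrite author's own statement) =====
-- stated objective: alternative
-- what changed: Instead of running delta* forward from every single start state for every word, B computes one backward-reachability set per word (states from which an accepting state is reachable on that word, propagated from the final states over the word's characters, with the usual early exit on the empty set) and reads each state's mark off by membership, filtering rows as it builds the table.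
import Mathlib
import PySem

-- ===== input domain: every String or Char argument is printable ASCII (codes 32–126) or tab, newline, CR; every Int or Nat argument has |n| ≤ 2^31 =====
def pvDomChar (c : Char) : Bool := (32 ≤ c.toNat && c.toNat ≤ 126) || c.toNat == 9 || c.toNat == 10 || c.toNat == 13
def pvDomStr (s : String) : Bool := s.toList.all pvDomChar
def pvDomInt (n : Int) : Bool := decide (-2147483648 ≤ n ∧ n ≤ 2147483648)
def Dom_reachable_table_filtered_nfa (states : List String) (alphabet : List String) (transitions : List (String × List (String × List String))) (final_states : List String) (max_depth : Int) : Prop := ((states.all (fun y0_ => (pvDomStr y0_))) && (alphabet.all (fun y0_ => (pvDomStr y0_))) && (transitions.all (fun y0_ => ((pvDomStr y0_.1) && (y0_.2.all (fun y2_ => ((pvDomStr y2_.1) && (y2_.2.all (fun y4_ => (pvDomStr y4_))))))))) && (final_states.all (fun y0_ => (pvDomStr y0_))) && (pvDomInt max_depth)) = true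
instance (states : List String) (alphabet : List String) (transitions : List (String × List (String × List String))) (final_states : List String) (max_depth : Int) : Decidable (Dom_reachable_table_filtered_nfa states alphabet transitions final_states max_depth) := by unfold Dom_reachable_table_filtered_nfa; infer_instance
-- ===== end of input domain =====

-- B replaces A's forward run of delta* from every single start state for every word by ONE
-- backward-reachability set per word, propagated from the final states over the word's
-- characters; each state's mark is then a membership test (objective: alternative).
-- 'transitions' is a Python dict (here an association list): both ports decode it once
-- with Dict.ofList (later value for a duplicate key wins, the key keeps its position),
-- exactly the dict the Python function receives. 'final_states' is a Python set
-- (distinct elements); it is only used through membership, never through its order.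
def pvTrans (transitions : List (String × List (String × List String))) : PySem.Dict String (PySem.Dict String (List String)) :=
  PySem.Dict.ofList (transitions.map (fun p => (p.1, PySem.Dict.ofList p.2)))

-- ===== PORT A =====
-- itertools.product(alphabet, repeat=n): tuples in product order (last coordinate varies fastest)
def pvA_product (alphabet : List String) : Nat → List (List String)
  | 0 => [[]]
  | n + 1 => (pvA_product alphabet n).flatMap (fun t => alphabet.map (fun s => t ++ [s]))

-- delta_star's inner loop: 'for symbol in word' iterates the CHARACTERS of the joined word
def pvA_delta (t : PySem.Dict String (PySem.Dict String (List String))) (cur : PySem.Set String) : List Char → PySem.Set String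
  | [] => cur
  | c :: rest =>
    let nxt := cur.foldl (fun acc st =>
      match PySem.Dict.get? t st with
      | some m =>
        match PySem.Dict.get? m (String.ofList [c]) with
        | some tg => PySem.Set.update acc tg
        | none => acc
      | none => acc) PySem.Set.empty
    if nxt = [] then nxt else pvA_delta t nxt rest

def pvA_row (t : PySem.Dict String (PySem.Dict String (List String))) (states : List String) (final_states : List String) (w : String) : PySem.Dict String String :=
  states.foldl (fun r s =>
    PySem.Dict.insert r s
      (if !(PySem.Set.inter (pvA_delta t (PySem.Set.ofList [s]) w.toList) final_states).isEmpty then "+" else ""))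
    PySem.Dict.empty

def reachable_table_filtered_nfa (states : List String) (alphabet : List String) (transitions : List (String × List (String × List String))) (final_states : List String) (max_depth : Int) : List (String × List (String × String)) :=
  let t := pvTrans transitions
  let words := (PySem.List.pyRange 1 (max_depth + 1) 1).foldl
    (fun ws d => ws ++ (pvA_product alphabet d.toNat).map (fun tup => PySem.Str.join "" tup)) [""]
  let table := words.foldl (fun tbl w => PySem.Dict.insert tbl w (pvA_row t states final_states w)) PySem.Dict.empty
  -- the final dict comprehension filters table's items (keys are unique, order kept);
  -- dict-valued rows leave as their items lists
  (table.items.filter (fun p => p.2.values.any (fun v => v == "+"))).map (fun p => (p.1, p.2.items))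

-- ===== PORT B =====
-- the backward step: {s for s, row in transitions.items() if any(q in acc for q in row.get(ch, ()))}
def pvB_pred (t : PySem.Dict String (PySem.Dict String (List String))) (acc : PySem.Set String) (c : Char) : PySem.Set String :=
  PySem.Set.ofList
    ((t.items.filter (fun p => (PySem.Dict.getD p.2 (String.ofList [c]) []).any (fun q => PySem.Set.contains acc q))).map Prod.fst)

-- the backward loop with its early exit: once acc is empty it can only stay empty
def pvB_bwdRun (t : PySem.Dict String (PySem.Dict String (List String))) (acc : PySem.Set String) : List Char → PySem.Set String
  | [] => acc
  | c :: cs =>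
    let nxt := pvB_pred t acc c
    if nxt = [] then nxt else pvB_bwdRun t nxt cs

-- {s: ("+" if s in acc else "") for s in states}
def pvB_rowOf (states : List String) (acc : PySem.Set String) : PySem.Dict String String :=
  states.foldl (fun r s => PySem.Dict.insert r s (if PySem.Set.contains acc s then "+" else "")) PySem.Dict.empty

def reachable_table_filtered_nfa_alt (states : List String) (alphabet : List String) (transitions : List (String × List (String × List String))) (final_states : List String) (max_depth : Int) : List (String × List (String × String)) :=
  let t := pvTrans transitions
  let wl := (PySem.List.pyRange 0 max_depth 1).foldl
    (fun (p : List String × List String) _d =>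
      let lvl := p.2.flatMap (fun w => alphabet.map (fun sym => w ++ sym))
      (p.1 ++ lvl, lvl)) ([""], [""])
  let table := wl.1.foldl (fun tbl w =>
    let acc := pvB_bwdRun t (PySem.Set.ofList final_states) w.toList.reverse
    let row := pvB_rowOf states acc
    if (PySem.Dict.values row).contains "+" then PySem.Dict.insert tbl w row else tbl) PySem.Dict.empty
  table.items.map (fun p => (p.1, p.2.items))

-- ===== PRECONDITION & SPEC =====
def Spec_reachable_table_filtered_nfa (states : List String) (alphabet : List String) (transitions : List (String × List (String × List String))) (final_states : List String) (max_depth : Int) (out : List (String × List (String × String))) : Prop := out = reachable_table_filtered_nfa_alt states alphabet transitions final_states max_depth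
instance (states : List String) (alphabet : List String) (transitions : List (String × List (String × List String))) (final_states : List String) (max_depth : Int) (out : List (String × List (String × String))) : Decidable (Spec_reachable_table_filtered_nfa states alphabet transitions final_states max_depth out) := by unfold Spec_reachable_table_filtered_nfa; infer_instance

-- ===== CLAIM (what is proved, stated in full; the proofs are below) =====
def Claim_equal_reachable_table_filtered_nfa : Prop := ∀ (states : List String) (alphabet : List String) (transitions : List (String × List (String × List String))) (final_states : List String) (max_depth : Int), Dom_reachable_table_filtered_nfa states alphabet transitions final_states max_depth → Spec_reachable_table_filtered_nfa states alphabet transitions final_states max_depth (reachable_table_filtered_nfa states alphabet transitions final_states max_depth)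

-- ===== LEMMAS AND PROOFS =====

lemma pv_ne_nil_iff {α : Type} (l : List α) : (¬ l = []) ↔ ∃ a, a ∈ l := by
  cases l <;> simp

-- the characters of the joined tuple
def pvChars (tup : List String) : List Char := tup.flatMap String.toList

lemma pv_flatten_intersperse_nil (ls : List (List Char)) :
    (List.intersperse [] ls).flatten = ls.flatten := by
  induction ls with
  | nil => rfl
  | cons a tl ih =>
    cases tl with
    | nil => rfl
    | cons b tl2 => simp [List.intersperse] at *; exact ih

lemma pv_join_eq (tup : List String) : PySem.Str.join "" tup = String.ofList (pvChars tup) := by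
  apply String.ext
  simp [PySem.Str.join, PySem.Chars.join, List.intercalate, pv_flatten_intersperse_nil,
    pvChars, List.flatMap]

lemma pv_ofList_append (l : List Char) (s : String) :
    String.ofList l ++ s = String.ofList (l ++ s.toList) := by
  apply String.ext; simp

-- A's one-character forward step (the body of delta_star's loop)
def pvFwd (t : PySem.Dict String (PySem.Dict String (List String))) (cur : PySem.Set String) (c : Char) : PySem.Set String :=
  cur.foldl (fun acc st =>
    match PySem.Dict.get? t st with
    | some m =>
      match PySem.Dict.get? m (String.ofList [c]) with
      | some tg => PySem.Set.update acc tg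
      | none => acc
    | none => acc) PySem.Set.empty

lemma pvFwd_empty (t : PySem.Dict String (PySem.Dict String (List String))) (c : Char) :
    pvFwd t [] c = [] := rfl

-- A's delta_star (with its early break) is the plain left fold of the forward step
lemma pvA_delta_eq_foldl (t : PySem.Dict String (PySem.Dict String (List String)))
    (cs : List Char) (cur : PySem.Set String) :
    pvA_delta t cur cs = cs.foldl (pvFwd t) cur := by
  induction cs generalizing cur with
  | nil => rfl
  | cons c rest ih =>
    show (if pvFwd t cur c = [] then pvFwd t cur c else pvA_delta t (pvFwd t cur c) rest)
        = rest.foldl (pvFwd t) (pvFwd t cur c)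
    by_cases h : pvFwd t cur c = []
    · rw [if_pos h, h]
      clear h ih
      induction rest with
      | nil => rfl
      | cons d rest2 ih2 => simpa [pvFwd_empty] using ih2
    · rw [if_neg h, ih]

-- the targets of one state on one character (empty when state or character is missing)
def pvTgt (t : PySem.Dict String (PySem.Dict String (List String))) (c : Char) (st : String) : List String :=
  match PySem.Dict.get? t st with
  | some m =>
    match PySem.Dict.get? m (String.ofList [c]) with
    | some tg => tg
    | none => []
  | none => []

lemma pv_mem_fwd_aux (t : PySem.Dict String (PySem.Dict String (List String))) (c : Char)
    (cur : List String) (acc : PySem.Set String) (q : String) :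
    q ∈ cur.foldl (fun acc st =>
      match PySem.Dict.get? t st with
      | some m =>
        match PySem.Dict.get? m (String.ofList [c]) with
        | some tg => PySem.Set.update acc tg
        | none => acc
      | none => acc) acc
    ↔ q ∈ acc ∨ ∃ st ∈ cur, q ∈ pvTgt t c st := by
  induction cur generalizing acc with
  | nil => simp
  | cons s cur ih =>
    simp only [List.foldl_cons, ih, List.mem_cons]
    unfold pvTgt
    cases h1 : PySem.Dict.get? t s with
    | none => simp [h1]
    | some m =>
      cases h2 : PySem.Dict.get? m (String.ofList [c]) with
      | none => simp [h1, h2]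
      | some tg => simp [h1, h2, PySem.Set.mem_update]; tauto

lemma pv_mem_fwd (t : PySem.Dict String (PySem.Dict String (List String))) (c : Char)
    (cur : PySem.Set String) (q : String) :
    q ∈ pvFwd t cur c ↔ ∃ st ∈ cur, q ∈ pvTgt t c st := by
  unfold pvFwd
  rw [pv_mem_fwd_aux]
  simp [PySem.Set.empty]

lemma pv_tgt_some (t : PySem.Dict String (PySem.Dict String (List String))) (c : Char)
    (s : String) (d : PySem.Dict String (List String)) (hget : PySem.Dict.get? t s = some d) :
    pvTgt t c s = (PySem.Dict.get? d (String.ofList [c])).getD [] := by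
  unfold pvTgt
  rw [hget]
  cases h2 : PySem.Dict.get? d (String.ofList [c]) <;> simp [h2]

lemma pv_tgt_none (t : PySem.Dict String (PySem.Dict String (List String))) (c : Char)
    (s : String) (hget : PySem.Dict.get? t s = none) :
    pvTgt t c s = [] := by
  unfold pvTgt
  rw [hget]

-- membership in B's backward step
lemma pv_mem_pred (t : PySem.Dict String (PySem.Dict String (List String)))
    (hnd : t.keys.Nodup) (acc : PySem.Set String) (c : Char) (s : String) :
    s ∈ pvB_pred t acc c ↔ ∃ q ∈ pvTgt t c s, q ∈ acc := by
  unfold pvB_pred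
  rw [PySem.Set.mem_ofList]
  simp only [List.mem_map, List.mem_filter]
  constructor
  · rintro ⟨⟨k, d⟩, ⟨hmem, hcond⟩, rfl⟩
    have hget : PySem.Dict.get? t k = some d := PySem.Dict.get?_of_mem_items t hmem hnd
    simp only [List.any_eq_true] at hcond
    obtain ⟨q, hq, hqa⟩ := hcond
    refine ⟨q, ?_, (PySem.Set.contains_iff acc q).mp hqa⟩
    rw [pv_tgt_some t c k d hget]
    rwa [PySem.Dict.getD_eq_get?_getD] at hq
  · rintro ⟨q, hq, hqa⟩
    cases h1 : PySem.Dict.get? t s with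
    | none => rw [pv_tgt_none t c s h1] at hq; simp at hq
    | some d =>
      rw [pv_tgt_some t c s d h1] at hq
      refine ⟨(s, d), ⟨PySem.Dict.mem_items_of_get?_eq_some t h1, ?_⟩, rfl⟩
      simp only [List.any_eq_true]
      exact ⟨q, by rwa [PySem.Dict.getD_eq_get?_getD], (PySem.Set.contains_iff acc q).mpr hqa⟩

lemma pvB_pred_empty (t : PySem.Dict String (PySem.Dict String (List String))) (c : Char) :
    pvB_pred t [] c = [] := by
  unfold pvB_pred
  have h : (t.items.filter (fun p => (PySem.Dict.getD p.2 (String.ofList [c]) []).any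
      (fun q => PySem.Set.contains ([] : PySem.Set String) q))) = [] :=
    List.filter_eq_nil_iff.mpr (by intro p _; simp [PySem.Set.contains])
  rw [h]
  rfl

-- B's backward loop (with its early exit) is the plain left fold of the backward step
lemma pvB_bwdRun_eq_foldl (t : PySem.Dict String (PySem.Dict String (List String)))
    (cs : List Char) (acc : PySem.Set String) :
    pvB_bwdRun t acc cs = cs.foldl (pvB_pred t) acc := by
  induction cs generalizing acc with
  | nil => rfl
  | cons c rest ih =>
    show (if pvB_pred t acc c = [] then pvB_pred t acc c else pvB_bwdRun t (pvB_pred t acc c) rest)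
        = rest.foldl (pvB_pred t) (pvB_pred t acc c)
    by_cases h : pvB_pred t acc c = []
    · rw [if_pos h, h]
      clear h ih
      induction rest with
      | nil => rfl
      | cons d rest2 ih2 => simpa [pvB_pred_empty] using ih2
    · rw [if_neg h, ih]

-- the backward-reachability set for a word, last character applied first
def pvBwd (t : PySem.Dict String (PySem.Dict String (List String))) (F0 : PySem.Set String) : List Char → PySem.Set String
  | [] => F0
  | c :: cs => pvB_pred t (pvBwd t F0 cs) c

lemma pv_bwd_eq_foldl_reverse (t : PySem.Dict String (PySem.Dict String (List String)))
    (F0 : PySem.Set String) (cs : List Char) :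
    cs.reverse.foldl (pvB_pred t) F0 = pvBwd t F0 cs := by
  rw [List.foldl_reverse]
  induction cs with
  | nil => rfl
  | cons c cs ih => simp [pvBwd, ih]

-- DUALITY: the forward run from X hits a final state iff some state of X is backward-reachable
lemma pv_dual (t : PySem.Dict String (PySem.Dict String (List String)))
    (hnd : t.keys.Nodup) (F : List String) (cs : List Char) (X : PySem.Set String) :
    (∃ q, q ∈ cs.foldl (pvFwd t) X ∧ q ∈ F)
      ↔ ∃ s ∈ X, s ∈ pvBwd t (PySem.Set.ofList F) cs := by
  induction cs generalizing X with
  | nil => simp [pvBwd, PySem.Set.mem_ofList]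
  | cons c cs ih =>
    rw [List.foldl_cons, ih (pvFwd t X c)]
    show _ ↔ ∃ s ∈ X, s ∈ pvB_pred t (pvBwd t (PySem.Set.ofList F) cs) c
    constructor
    · rintro ⟨s, hs, hb⟩
      obtain ⟨st, hst, hsT⟩ := (pv_mem_fwd t c X s).mp hs
      exact ⟨st, hst, (pv_mem_pred t hnd _ c st).mpr ⟨s, hsT, hb⟩⟩
    · rintro ⟨st, hst, hp⟩
      obtain ⟨q, hqT, hqb⟩ := (pv_mem_pred t hnd _ c st).mp hp
      exact ⟨q, (pv_mem_fwd t c X q).mpr ⟨st, hst, hqT⟩, hqb⟩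

-- A's per-state acceptance test equals membership in B's backward set
lemma pv_cond_eq (t : PySem.Dict String (PySem.Dict String (List String)))
    (hnd : t.keys.Nodup) (final_states : List String) (w : String) (s : String) :
    (!(PySem.Set.inter (pvA_delta t (PySem.Set.ofList [s]) w.toList) final_states).isEmpty)
      = PySem.Set.contains (w.toList.reverse.foldl (pvB_pred t) (PySem.Set.ofList final_states)) s := by
  rw [pvA_delta_eq_foldl, pv_bwd_eq_foldl_reverse, Bool.eq_iff_iff]
  have hofl : PySem.Set.ofList [s] = [s] := rfl
  rw [hofl]
  constructor
  · intro h
    simp only [Bool.not_eq_eq_eq_not, Bool.not_true, List.isEmpty_eq_false_iff] at h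
    obtain ⟨q, hq⟩ := (pv_ne_nil_iff _).mp h
    rw [PySem.Set.mem_inter] at hq
    have := (pv_dual t hnd final_states w.toList [s]).mp ⟨q, hq.1, hq.2⟩
    obtain ⟨s', hs', hmem⟩ := this
    simp only [List.mem_singleton] at hs'
    subst hs'
    exact (PySem.Set.contains_iff _ _).mpr hmem
  · intro h
    have hmem := (PySem.Set.contains_iff _ _).mp h
    obtain ⟨q, hq1, hq2⟩ := (pv_dual t hnd final_states w.toList [s]).mpr ⟨s, by simp, hmem⟩
    simp only [Bool.not_eq_eq_eq_not, Bool.not_true, List.isEmpty_eq_false_iff]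
    exact (pv_ne_nil_iff _).mpr ⟨q, (PySem.Set.mem_inter _ _ _).mpr ⟨hq1, hq2⟩⟩

-- A's row for a word is B's row on its backward set
lemma pv_row_eq (t : PySem.Dict String (PySem.Dict String (List String)))
    (hnd : t.keys.Nodup) (states final_states : List String) (w : String) :
    pvA_row t states final_states w
      = pvB_rowOf states (w.toList.reverse.foldl (pvB_pred t) (PySem.Set.ofList final_states)) := by
  unfold pvA_row pvB_rowOf
  refine PySem.List.foldl_congr_mem _ _ _ _ ?_
  intro r s _
  rw [pv_cond_eq t hnd final_states w s]

-- ===== the word lists coincide =====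

-- the (possibly duplicated) words of depth n, in A's enumeration order
def pvWords (alphabet : List String) (n : Nat) : List String :=
  (pvA_product alphabet n).map (fun tup => String.ofList (pvChars tup))

-- all words up to depth n, in A's enumeration order
def pvAll (alphabet : List String) (n : Nat) : List String :=
  "" :: (List.range n).flatMap (fun k => pvWords alphabet (k + 1))

lemma pv_chars_snoc (tup : List String) (sym : String) :
    pvChars (tup ++ [sym]) = pvChars tup ++ sym.toList := by
  simp [pvChars]

lemma pv_word_snoc (tup : List String) (sym : String) :
    String.ofList (pvChars tup) ++ sym = String.ofList (pvChars (tup ++ [sym])) := by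
  rw [pv_ofList_append, pv_chars_snoc]

lemma pvWords_succ (alphabet : List String) (n : Nat) :
    pvWords alphabet (n + 1) = (pvWords alphabet n).flatMap (fun w => alphabet.map (fun sym => w ++ sym)) := by
  unfold pvWords
  show (pvA_product alphabet (n+1)).map _ = _
  rw [List.flatMap_map]
  simp only [pvA_product, List.map_flatMap, List.map_map]
  refine List.flatMap_congr ?_
  intro tup _
  refine List.map_congr_left ?_
  intro sym _
  simp only [Function.comp_def]
  rw [pv_word_snoc]

lemma pvAll_succ (alphabet : List String) (n : Nat) :
    pvAll alphabet (n + 1) = pvAll alphabet n ++ pvWords alphabet (n + 1) := by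
  unfold pvAll
  rw [List.range_succ, List.flatMap_append, List.flatMap_cons, List.flatMap_nil, List.append_nil]
  rfl

-- B's word-generating loop
lemma pv_B_words (alphabet : List String) (L : List Int) :
    L.foldl (fun (p : List String × List String) _d =>
        (p.1 ++ p.2.flatMap (fun w => alphabet.map (fun sym => w ++ sym)),
         p.2.flatMap (fun w => alphabet.map (fun sym => w ++ sym)))) ([""], [""])
      = (pvAll alphabet L.length, pvWords alphabet L.length) := by
  induction L using List.reverseRecOn with
  | nil => rfl
  | append_singleton L d ih =>
    rw [List.foldl_append, ih]
    simp only [List.foldl_cons, List.foldl_nil, List.length_append, List.length_singleton]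
    rw [← pvWords_succ, ← pvAll_succ]

lemma pv_B_words_fst (alphabet : List String) (L : List Int) :
    (L.foldl (fun (p : List String × List String) _d =>
        (p.1 ++ p.2.flatMap (fun w => alphabet.map (fun sym => w ++ sym)),
         p.2.flatMap (fun w => alphabet.map (fun sym => w ++ sym)))) ([""], [""])).1
      = pvAll alphabet L.length := by
  rw [pv_B_words]

-- A's word-generating loop
lemma pv_A_words (alphabet : List String) (n : Nat) :
    (((List.range n).map (fun (k : Nat) => (1 : Int) + (k : Int))).foldl
        (fun ws d => ws ++ (pvA_product alphabet d.toNat).map (fun tup => PySem.Str.join "" tup)) [""])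
      = pvAll alphabet n := by
  rw [PySem.List.foldl_append_eq_flatMap, List.flatMap_map]
  unfold pvAll
  rw [List.singleton_append]
  congr 1
  refine List.flatMap_congr ?_
  intro k _
  have : ((1 : Int) + (k : Int)).toNat = k + 1 := by omega
  rw [this]
  unfold pvWords
  refine List.map_congr_left ?_
  intro tup _
  rw [pv_join_eq]

-- ===== dict folds and filtering =====

-- lookup in a fold of key-determined inserts
lemma pv_get_insfold {ν : Type} (F : String → ν) (L : List String) (d : PySem.Dict String ν) (k : String) :
    (L.foldl (fun d w => PySem.Dict.insert d w (F w)) d).get? k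
      = if k ∈ L then some (F k) else d.get? k := by
  induction L generalizing d with
  | nil => simp
  | cons w L ih =>
    simp only [List.foldl_cons, ih, List.mem_cons]
    by_cases hk : k ∈ L
    · simp [hk]
    · by_cases hkw : k = w
      · simp [hkw, PySem.Dict.get?_insert_self]
      · simp [hk, hkw, PySem.Dict.get?_insert_of_ne _ _ hkw]

-- the items of a fold of key-determined inserts from empty
lemma pv_items_insfold {ν : Type} (F : String → ν) (dflt : ν) (L : List String) :
    (L.foldl (fun d w => PySem.Dict.insert d w (F w)) PySem.Dict.empty).items
      = (PySem.Set.ofList L).map (fun w => (w, F w)) := by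
  have hnd : (L.foldl (fun d w => PySem.Dict.insert d w (F w)) PySem.Dict.empty).keys.Nodup :=
    PySem.Dict.nodup_keys_foldl_insert _ _ _ PySem.Dict.nodup_keys_empty
  rw [PySem.Dict.items_eq_map_keys _ hnd dflt, PySem.Dict.keys_foldl_insert]
  rw [PySem.Dict.keys_empty, PySem.Set.update_nil_left]
  refine List.map_congr_left ?_
  intro w hw
  rw [PySem.Dict.getD_eq_get?_getD, pv_get_insfold, if_pos ((PySem.Set.mem_ofList _ _).mp hw)]
  rfl

-- deduplication commutes with a filter
lemma pv_ofList_filter {α : Type} [BEq α] [LawfulBEq α] (q : α → Bool) (xs : List α) :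
    PySem.Set.ofList (xs.filter q) = (PySem.Set.ofList xs).filter q := by
  induction xs using List.reverseRecOn with
  | nil => rfl
  | append_singleton xs x ih =>
    rw [List.filter_append, PySem.Set.ofList_append_singleton, PySem.Set.add_eq_ite]
    cases hq : q x with
    | false =>
      by_cases hx : x ∈ PySem.Set.ofList xs
      · simp [hq, hx, ih]
      · rw [if_neg hx, List.filter_append]
        simp [hq, ih]
    | true =>
      have h1 : List.filter q [x] = [x] := by simp [hq]
      rw [h1]
      by_cases hx : x ∈ PySem.Set.ofList xs
      · rw [if_pos hx, PySem.Set.ofList_append_singleton, ih,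
          PySem.Set.add_of_mem (by rw [List.mem_filter]; exact ⟨hx, hq⟩)]
      · rw [if_neg hx, List.filter_append, h1, PySem.Set.ofList_append_singleton, ih,
          PySem.Set.add_of_not_mem (fun hc => hx (List.mem_filter.mp hc).1)]

-- Python's '"+" in row.values()' is A's 'any(v == "+")'
lemma pv_contains_plus (l : List String) : l.contains "+" = l.any (fun v => v == "+") := by
  rw [Bool.eq_iff_iff]; simp

theorem reachable_table_filtered_nfa_spec : Claim_equal_reachable_table_filtered_nfa := by
  intro states alphabet transitions final_states max_depth _dom
  unfold Spec_reachable_table_filtered_nfa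
  simp only [reachable_table_filtered_nfa, reachable_table_filtered_nfa_alt]
  simp only [pvB_bwdRun_eq_foldl]
  have hnd : (pvTrans transitions).keys.Nodup := PySem.Dict.nodup_keys_ofList _
  set t := pvTrans transitions with ht
  -- both word lists are pvAll alphabet max_depth.toNat
  rw [PySem.List.pyRange_one, add_sub_cancel_right, pv_A_words]
  rw [PySem.List.pyRange_one, pv_B_words_fst alphabet _]
  simp only [List.length_map, List.length_range, sub_zero]
  set W := pvAll alphabet max_depth.toNat with hW
  -- the word-keyed row function
  set R := fun w : String =>
    pvB_rowOf states (w.toList.reverse.foldl (pvB_pred t) (PySem.Set.ofList final_states)) with hR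
  set P := fun w : String => ((R w).values.any (fun v => v == "+")) with hP
  -- A's table items, filtered
  have hA : (W.foldl (fun tbl w => PySem.Dict.insert tbl w (pvA_row t states final_states w)) PySem.Dict.empty)
      = W.foldl (fun tbl w => PySem.Dict.insert tbl w (R w)) PySem.Dict.empty := by
    refine PySem.List.foldl_congr_mem _ _ _ _ ?_
    intro tbl w _
    rw [pv_row_eq t hnd states final_states w]
  rw [hA, pv_items_insfold R (PySem.Dict.empty)]
  rw [List.filter_map, show ((fun p : String × PySem.Dict String String =>
      p.2.values.any (fun v => v == "+")) ∘ fun w => (w, R w)) = P from rfl]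
  -- B's table items
  have hB : (W.foldl (fun tbl w =>
        if (PySem.Dict.values (R w)).contains "+" then PySem.Dict.insert tbl w (R w) else tbl)
        PySem.Dict.empty)
      = (W.filter P).foldl (fun tbl w => PySem.Dict.insert tbl w (R w)) PySem.Dict.empty := by
    rw [List.foldl_filter]
    refine PySem.List.foldl_congr_mem _ _ _ _ ?_
    intro tbl w _
    rw [hP, pv_contains_plus]
  rw [hB, pv_items_insfold R (PySem.Dict.empty), pv_ofList_filter]
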